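-- pv_equiv track=rewrite | github.com/yama662607/Quantum-information | tools/validate_docs.py | check_fenced_divs
-- ===== SOURCE A (Python) =====
-- from typing import List, Dict, Any
--
-- def check_fenced_divs(
--     filepath: str, lines: List[str], do_fix: bool = False
-- ) -> Dict[str, Any]:
--     """Checks for blank lines before fences. Returns results and fixed lines if requested."""
--     errors = []
--     fixed_lines = list(lines)
--     offset = 0
--     in_code_block = False
--     in_frontmatter = False
--
--     for i, line in enumerate(lines):
--         stripped_line = line.strip()
--
--         if i == 0 and stripped_line == "---":
--             in_frontmatter = True
--             continue
--         if in_frontmatter: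
--             if stripped_line == "---":
--                 in_frontmatter = False
--             continue
--
--         if stripped_line.startswith("```"):
--             in_code_block = not in_code_block
--             continue
--         if in_code_block:
--             continue
--
--         if stripped_line.startswith(":::"):
--             if i > 0:
--                 prev_line = fixed_lines[i + offset - 1].strip()
--                 if prev_line and prev_line != "---":
--                     # We allow consecutive ::: for nested divs if desired,
--                     # but typically Quarto/Pandoc prefer blank lines between them too.
--                     if not prev_line.startswith(":::"):
--                         errors.append(
--                             f"[Style] Line {i + 1}: Fenced div boundary ':::' must be preceded by a blank line."
--                         )
--                         if do_fix:
--                             fixed_lines.insert(i + offset, "")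
--                             offset += 1
--             continue
--
--         # --- New check: lists inside fenced divs ---
--         # Detect if we are inside a fenced div block (roughly)
--         # We look for a line starting with list markers (1. , - , * )
--         # that is immediately preceded by a non-blank line that is not a list item.
--         if (
--             stripped_line.startswith("1. ")
--             or stripped_line.startswith("- ")
--             or stripped_line.startswith("* ")
--         ):
--             if i > 0:
--                 # Check preceding line in fixed_lines (including potentially inserted lines)
--                 prev_idx = i + offset - 1
--                 if prev_idx >= 0:
--                     prev_line = fixed_lines[prev_idx].strip()
--                     # If the previous line is not blank AND not another list item AND not a fence separator
--                     # AND we are likely inside a block (heuristic: recent line was a ::: or a header)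
--                     is_prev_list = (
--                         prev_line.startswith("1. ")
--                         or prev_line.startswith("- ")
--                         or prev_line.startswith("* ")
--                     )
--                     is_prev_fence = prev_line.startswith(":::")
--                     if prev_line and not is_prev_list and not is_prev_fence:
--                         # Specifically check if we are inside a definition/theorem block
--                         # by looking back a few lines for the opening ::: {#def or similar
--                         is_inside_block = False
--                         for j in range(max(0, i - 10), i):
--                             if lines[j].strip().startswith("::: {#"):
--                                 is_inside_block = True
--                                 break
--
--                         if is_inside_block:
--                             errors.append(
--                                 f"[Style] Line {i + 1}: List item '{stripped_line[:3]}...' inside block should be preceded by a blank line for correct rendering."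
--                             )
--                             if do_fix:
--                                 fixed_lines.insert(i + offset, "")
--                                 offset += 1
--
--     return {"errors": errors, "fixed_lines": fixed_lines if do_fix else None}
-- ===== SOURCE B (Python) =====
-- from typing import List, Dict, Any
--
-- def check_fenced_divs(
--     filepath: str, lines: List[str], do_fix: bool = False
-- ) -> Dict[str, Any]:
--     """Same lint, single pass: no inner lookback rescan (a scalar index of the
--     last '::: {#' opener replaces it) and no in-place mutation of a copy with
--     offset bookkeeping (the previous ORIGINAL line is what the check really
--     sees, and the fixed list is assembled afterwards from the flagged indices)."""
--     errors = []
--     flagged = []            # original indices needing a blank line inserted before them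
--     in_code = False
--     in_front = False
--     last_open = None        # most recent index whose stripped line starts with '::: {#'
--     for i, line in enumerate(lines):
--         s = line.strip()
--         if s.startswith("::: {#"):
--             last_open = i
--         if i == 0 and s == "---":
--             in_front = True
--             continue
--         if in_front:
--             if s == "---":
--                 in_front = False
--             continue
--         if s.startswith("```"):
--             in_code = not in_code
--             continue
--         if in_code:
--             continue
--         prev = lines[i - 1].strip() if i > 0 else ""
--         if s.startswith(":::"):
--             if i > 0 and prev and prev != "---" and not prev.startswith(":::"):
--                 errors.append(
--                     f"[Style] Line {i + 1}: Fenced div boundary ':::' must be preceded by a blank line."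
--                 )
--                 flagged.append(i)
--             continue
--         if s.startswith("1. ") or s.startswith("- ") or s.startswith("* "):
--             is_prev_list = prev.startswith("1. ") or prev.startswith("- ") or prev.startswith("* ")
--             if i > 0 and prev and not is_prev_list and not prev.startswith(":::"):
--                 if last_open is not None and last_open >= i - 10:
--                     errors.append(
--                         f"[Style] Line {i + 1}: List item '{s[:3]}...' inside block should be preceded by a blank line for correct rendering."
--                     )
--                     flagged.append(i)
--     if do_fix:
--         fixed_lines = []
--         k = 0
--         for i, line in enumerate(lines):
--             if k < len(flagged) and flagged[k] == i:
--                 fixed_lines.append("")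
--                 k += 1
--             fixed_lines.append(line)
--     else:
--         fixed_lines = None
--     return {"errors": errors, "fixed_lines": fixed_lines}
-- ===== Notes on version B (the rewrite author's own statement) =====
-- stated objective: alternative
-- what changed: B replaces A's per-list-item 10-line lookback rescan with a tracked last-'::: {#'-opener index, and replaces A's offset-tracked in-place blank insertions into a mutated copy by reading the previous ORIGINAL line directly and assembling fixed_lines in a separate pass from the flagged line indices.
import Mathlib
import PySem

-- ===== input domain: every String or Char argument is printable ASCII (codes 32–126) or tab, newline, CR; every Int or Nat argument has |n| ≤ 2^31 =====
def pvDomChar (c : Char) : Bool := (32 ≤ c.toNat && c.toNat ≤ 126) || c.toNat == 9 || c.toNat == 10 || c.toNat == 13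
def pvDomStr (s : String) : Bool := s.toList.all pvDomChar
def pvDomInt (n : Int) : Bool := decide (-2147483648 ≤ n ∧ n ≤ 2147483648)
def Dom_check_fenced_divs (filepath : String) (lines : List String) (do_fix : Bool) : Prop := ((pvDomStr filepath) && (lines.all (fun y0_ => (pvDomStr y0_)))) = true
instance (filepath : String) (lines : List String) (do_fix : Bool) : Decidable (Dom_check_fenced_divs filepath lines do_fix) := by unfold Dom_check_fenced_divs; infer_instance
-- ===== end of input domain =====

-- B replaces A's 10-line lookback rescan by a tracked last-opener index and A's
-- offset-bookkeeping mutation of a copy by reading the previous original line and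
-- assembling the fixed list afterwards from the flagged indices (objective: alternative).

-- ===== PORT A =====
-- the two f-string messages (identical literals in both Pythons)
def pvMsgFence (i : Int) : String :=
  "[Style] Line " ++ PySem.Int.toStr (i + 1) ++ ": Fenced div boundary ':::' must be preceded by a blank line."
def pvMsgList (i : Int) (s : String) : String :=
  "[Style] Line " ++ PySem.Int.toStr (i + 1) ++ ": List item '" ++ PySem.Str.slice s none (some 3) ++ "...' inside block should be preceded by a blank line for correct rendering."

-- A's inner lookback loop 'for j in range(max(0, i - 10), i): … break' as a fold
def pvLookA (lines : List String) (i : Int) : Bool :=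
  (PySem.List.pyRange (max 0 (i - 10)) i 1).foldl
    (fun acc j => if acc then acc
      -- lines[j]: 0 ≤ j < i ≤ len(lines), always in range, exact via pyGetD
      else PySem.Str.startswith (PySem.Str.strip (PySem.List.pyGetD lines j "")) "::: {#") false

structure PvStA where
  errors : List String
  fixed : List String
  offset : Int
  inCode : Bool
  inFront : Bool

-- one iteration of A's 'for i, line in enumerate(lines)' body
def pvStepA (lines : List String) (do_fix : Bool) (st : PvStA) (p : Int × String) : PvStA :=
  let i := p.1
  let s := PySem.Str.strip p.2
  if i == 0 && s == "---" then { st with inFront := true }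
  else if st.inFront then
    (if s == "---" then { st with inFront := false } else st)
  else if PySem.Str.startswith s "```" then { st with inCode := !st.inCode }
  else if st.inCode then st
  else if PySem.Str.startswith s ":::" then
    (if 0 < i then
      -- fixed_lines[i + offset - 1]: i ≥ 1 keeps it in range, exact via pyGetD
      let prev := PySem.Str.strip (PySem.List.pyGetD st.fixed (i + st.offset - 1) "")
      if (prev != "") && (prev != "---") && !(PySem.Str.startswith prev ":::") then
        { st with errors := st.errors ++ [pvMsgFence i],
                  fixed := if do_fix then PySem.List.insert st.fixed (i + st.offset) "" else st.fixed,
                  offset := if do_fix then st.offset + 1 else st.offset }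
      else st
    else st)
  else if PySem.Str.startswith s "1. " || PySem.Str.startswith s "- " || PySem.Str.startswith s "* " then
    (if 0 < i then
      let prevIdx := i + st.offset - 1
      if 0 ≤ prevIdx then
        let prev := PySem.Str.strip (PySem.List.pyGetD st.fixed prevIdx "")
        let isPrevList := PySem.Str.startswith prev "1. " || PySem.Str.startswith prev "- " || PySem.Str.startswith prev "* "
        let isPrevFence := PySem.Str.startswith prev ":::"
        if (prev != "") && !isPrevList && !isPrevFence then
          if pvLookA lines i then
            { st with errors := st.errors ++ [pvMsgList i s],
                      fixed := if do_fix then PySem.List.insert st.fixed (i + st.offset) "" else st.fixed,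
                      offset := if do_fix then st.offset + 1 else st.offset }
          else st
        else st
      else st
    else st)
  else st

def check_fenced_divs (filepath : String) (lines : List String) (do_fix : Bool) : List (String × List String) :=
  let fin := (PySem.List.enumerate lines 0).foldl (pvStepA lines do_fix) ⟨[], lines, 0, false, false⟩
  -- {"errors": …, "fixed_lines": fixed if do_fix else None}: None is not a List String,
  -- Pre_ excludes do_fix = false; [] stands in for None there
  [("errors", fin.errors), ("fixed_lines", if do_fix then fin.fixed else [])]

-- ===== PORT B =====
-- B's test 'last_open is not None and last_open >= i - 10'
def pvNear (i : Int) (lo : Option Int) : Bool :=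
  match lo with
  | some m => decide (m ≥ i - 10)
  | none => false

structure PvStB where
  errors : List String
  flagged : List Int
  inCode : Bool
  inFront : Bool
  lastOpen : Option Int

-- one iteration of B's single pass
def pvStepB (lines : List String) (st0 : PvStB) (p : Int × String) : PvStB :=
  let i := p.1
  let s := PySem.Str.strip p.2
  let st := { st0 with lastOpen := if PySem.Str.startswith s "::: {#" then some i else st0.lastOpen }
  if i == 0 && s == "---" then { st with inFront := true }
  else if st.inFront then
    (if s == "---" then { st with inFront := false } else st)
  else if PySem.Str.startswith s "```" then { st with inCode := !st.inCode }
  else if st.inCode then st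
  else
    -- lines[i-1]: i ≥ 1 keeps it in range, exact via pyGetD
    let prev := if 0 < i then PySem.Str.strip (PySem.List.pyGetD lines (i - 1) "") else ""
    if PySem.Str.startswith s ":::" then
      (if 0 < i && (prev != "") && (prev != "---") && !(PySem.Str.startswith prev ":::") then
        { st with errors := st.errors ++ [pvMsgFence i], flagged := st.flagged ++ [i] }
      else st)
    else if PySem.Str.startswith s "1. " || PySem.Str.startswith s "- " || PySem.Str.startswith s "* " then
      let isPrevList := PySem.Str.startswith prev "1. " || PySem.Str.startswith prev "- " || PySem.Str.startswith prev "* "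
      if 0 < i && (prev != "") && !isPrevList && !(PySem.Str.startswith prev ":::") then
        (if pvNear i st.lastOpen then
          { st with errors := st.errors ++ [pvMsgList i s], flagged := st.flagged ++ [i] }
        else st)
      else st
    else st

-- B's rebuild of the fixed list: walk the enumerated lines with a pointer into flagged
def pvBuild : List (Int × String) → List Int → List String
  | [], _ => []
  | p :: rest, [] => p.2 :: pvBuild rest []
  | p :: rest, f :: fs => if f == p.1 then "" :: p.2 :: pvBuild rest fs else p.2 :: pvBuild rest (f :: fs)

def check_fenced_divs_alt (filepath : String) (lines : List String) (do_fix : Bool) : List (String × List String) :=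
  let fin := (PySem.List.enumerate lines 0).foldl (pvStepB lines) ⟨[], [], false, false, none⟩
  [("errors", fin.errors), ("fixed_lines", if do_fix then pvBuild (PySem.List.enumerate lines 0) fin.flagged else [])]

-- ===== PRECONDITION & SPEC =====
-- Pre_ excludes do_fix = false, where A returns {"errors": …, "fixed_lines": None}:
-- None is not a value of the declared return type List (String × List String).
def Pre_check_fenced_divs (filepath : String) (lines : List String) (do_fix : Bool) : Prop := do_fix = true
instance (filepath : String) (lines : List String) (do_fix : Bool) : Decidable (Pre_check_fenced_divs filepath lines do_fix) := by unfold Pre_check_fenced_divs; infer_instance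
def pvWitness_check_fenced_divs : String × List String × Bool :=
  ("doc.md", ["::: {#def-a}", "Some text.", "- item", ":::"], true)

def Spec_check_fenced_divs (filepath : String) (lines : List String) (do_fix : Bool) (out : List (String × List String)) : Prop := out = check_fenced_divs_alt filepath lines do_fix
instance (filepath : String) (lines : List String) (do_fix : Bool) (out : List (String × List String)) : Decidable (Spec_check_fenced_divs filepath lines do_fix out) := by unfold Spec_check_fenced_divs; infer_instance

-- ===== CLAIM (what is proved, stated in full; the proofs are below) =====
def Claim_equal_check_fenced_divs : Prop := ∀ (filepath : String) (lines : List String) (do_fix : Bool), Dom_check_fenced_divs filepath lines do_fix → Pre_check_fenced_divs filepath lines do_fix → Spec_check_fenced_divs filepath lines do_fix (check_fenced_divs filepath lines do_fix)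

-- ===== LEMMAS AND PROOFS =====

-- Python list.insert clamps the position: unconditional take/drop form for a Nat position
theorem pvInsert_natCast' {α : Type} (xs : List α) (n : Nat) (v : α) :
    PySem.List.insert xs (n : Int) v = xs.take n ++ v :: xs.drop n := by
  by_cases h : n ≤ xs.length
  · exact PySem.List.insert_natCast xs n v h
  · unfold PySem.List.insert PySem.List.sliceIndices
    simp only []
    rw [if_neg (by omega), if_neg (by omega)]
    have h1 : min (n : Int) (xs.length : Int) = (xs.length : Int) := by omega
    rw [h1]
    simp only [Int.toNat_natCast]
    rw [List.take_length, List.drop_length, List.take_of_length_le (by omega),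
        List.drop_eq_nil_of_le (by omega)]

theorem pvInsert_cons_succ {α : Type} (a : α) (xs : List α) (m : Int) (hm : 0 ≤ m) (v : α) :
    PySem.List.insert (a :: xs) (m + 1) v = a :: PySem.List.insert xs m v := by
  rw [show m = ((m.toNat : Nat) : Int) by omega]
  rw [show ((m.toNat : Nat) : Int) + 1 = ((m.toNat + 1 : Nat) : Int) by push_cast; ring]
  rw [pvInsert_natCast', pvInsert_natCast']
  simp

theorem pvBuild_nil_flag (xs : List String) : ∀ s : Int, pvBuild (PySem.List.enumerate xs s) [] = xs := by
  induction xs with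
  | nil => intro s; simp [PySem.List.enumerate_nil, pvBuild]
  | cons y ys ih => intro s; rw [PySem.List.enumerate_cons]; simp [pvBuild, ih]

-- the element just before original line i in the rebuilt list is original line i-1
theorem pvBuild_getD (xs : List String) : ∀ (s i : Nat) (fl : List Int),
    fl.Pairwise (· < ·) → (∀ f ∈ fl, (s : Int) ≤ f ∧ f < (i : Int)) →
    s < i → i ≤ s + xs.length →
    (pvBuild (PySem.List.enumerate xs s) fl).getD (i - s + fl.length - 1) "" = xs.getD (i - 1 - s) "" := by
  induction xs with
  | nil => intro s i fl _ _ h1 h2; simp at h2; omega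
  | cons y ys ih =>
    intro s i fl hpw hb hsi hle
    rw [PySem.List.enumerate_cons]
    match fl with
    | [] =>
      show (y :: pvBuild (PySem.List.enumerate ys ((s:Int) + 1)) []).getD (i - s + 0 - 1) "" = _
      by_cases hi : i = s + 1
      · subst hi; simp
      · have hsi2 : s + 1 < i := by omega
        rw [show i - s + 0 - 1 = (i - (s + 1) + 0 - 1) + 1 by omega, List.getD_cons_succ]
        rw [show (s : Int) + 1 = ((s + 1 : Nat) : Int) by push_cast; ring]
        have hih := ih (s + 1) i [] (by simp) (by simp) hsi2 (by have := hle; simp at this; omega)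
        simp only [List.length_nil] at hih
        rw [hih, show i - 1 - s = (i - 1 - (s + 1)) + 1 by omega, List.getD_cons_succ]
    | f :: fs =>
      have hf := hb f (List.mem_cons_self)
      have hfs : ∀ f' ∈ fs, ((s : Int) + 1) ≤ f' ∧ f' < (i : Int) := by
        intro f' hf'
        have h1 := (hb f' (List.mem_cons_of_mem f hf')).2
        have h2 := (List.pairwise_cons.mp hpw).1 f' hf'
        have h3 := (hb f' (List.mem_cons_of_mem f hf')).1
        exact ⟨by omega, h1⟩
      by_cases hfe : f = (s : Int)
      · subst hfe
        show (if (s:Int) == (s:Int) then "" :: y :: pvBuild (PySem.List.enumerate ys ((s:Int)+1)) fs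
              else y :: pvBuild (PySem.List.enumerate ys ((s:Int)+1)) ((s:Int) :: fs)).getD (i - s + (fs.length + 1) - 1) "" = _
        rw [if_pos (by simp)]
        by_cases hi : i = s + 1
        · have hfsnil : fs = [] := by
            cases fs with
            | nil => rfl
            | cons f' _ =>
              have := hfs f' (List.mem_cons_self)
              omega
          subst hi hfsnil
          simp
        · have hsi2 : s + 1 < i := by omega
          rw [show i - s + (fs.length + 1) - 1 = ((i - (s + 1) + fs.length - 1) + 1) + 1 by omega,
              List.getD_cons_succ, List.getD_cons_succ]
          rw [show (s : Int) + 1 = ((s + 1 : Nat) : Int) by push_cast; ring]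
          rw [ih (s + 1) i fs (List.pairwise_cons.mp hpw).2 (by simpa using hfs) hsi2 (by have := hle; simp at this; omega)]
          rw [show i - 1 - s = (i - 1 - (s + 1)) + 1 by omega, List.getD_cons_succ]
      · have hfgt : (s : Int) + 1 ≤ f := by omega
        have hsi2 : s + 1 < i := by omega
        show (if f == (s:Int) then "" :: y :: pvBuild (PySem.List.enumerate ys ((s:Int)+1)) fs
              else y :: pvBuild (PySem.List.enumerate ys ((s:Int)+1)) (f :: fs)).getD (i - s + (fs.length + 1) - 1) "" = _
        rw [if_neg (by simpa using hfe)]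
        rw [show i - s + (fs.length + 1) - 1 = (i - (s + 1) + (fs.length + 1) - 1) + 1 by omega,
            List.getD_cons_succ]
        rw [show (s : Int) + 1 = ((s + 1 : Nat) : Int) by push_cast; ring]
        have hih := ih (s + 1) i (f :: fs) hpw (by
              intro f' hf'
              rcases List.mem_cons.mp hf' with h | h
              · subst h; exact ⟨by push_cast; omega, hf.2⟩
              · have := hfs f' h; push_cast; push_cast at this; omega) hsi2 (by have := hle; simp at this; omega)
        simp only [List.length_cons] at hih
        rw [hih]
        rw [show i - 1 - s = (i - 1 - (s + 1)) + 1 by omega, List.getD_cons_succ]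

-- inserting a blank at position i + |fl| is recording i as one more flagged index
theorem pvBuild_insert (xs : List String) : ∀ (s i : Nat) (fl : List Int),
    fl.Pairwise (· < ·) → (∀ f ∈ fl, (s : Int) ≤ f ∧ f < (i : Int)) →
    s ≤ i → i < s + xs.length →
    PySem.List.insert (pvBuild (PySem.List.enumerate xs s) fl) (((i - s) + fl.length : Nat) : Int) ""
      = pvBuild (PySem.List.enumerate xs s) (fl ++ [(i : Int)]) := by
  induction xs with
  | nil => intro s i fl _ _ h1 h2; simp at h2; omega
  | cons y ys ih =>
    intro s i fl hpw hb hsi hlt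
    rw [PySem.List.enumerate_cons]
    match fl with
    | [] =>
      show PySem.List.insert (y :: pvBuild (PySem.List.enumerate ys ((s:Int)+1)) []) (((i - s) + 0 : Nat) : Int) ""
          = (if (i:Int) == (s:Int) then "" :: y :: pvBuild (PySem.List.enumerate ys ((s:Int)+1)) []
             else y :: pvBuild (PySem.List.enumerate ys ((s:Int)+1)) ((i:Int) :: []))
      by_cases hi : i = s
      · subst hi
        rw [if_pos (by simp)]
        rw [show ((i - i + 0 : Nat) : Int) = ((0 : Nat) : Int) by norm_num]
        rw [pvInsert_natCast']
        simp
      · have hgt : s < i := by omega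
        rw [if_neg (by simp; omega)]
        rw [show (((i - s) + 0 : Nat) : Int) = (((i - (s + 1)) + 0 : Nat) : Int) + 1 by push_cast; omega]
        rw [pvInsert_cons_succ y _ _ (Int.natCast_nonneg _) ""]
        rw [show (s : Int) + 1 = ((s + 1 : Nat) : Int) by push_cast; ring]
        have hih := ih (s + 1) i [] (by simp) (by simp) hgt (by have := hlt; simp at this; omega)
        simp only [List.length_nil] at hih
        rw [hih, List.nil_append]
    | f :: fs =>
      have hf := hb f (List.mem_cons_self)
      have hfs : ∀ f' ∈ fs, ((s : Int) + 1) ≤ f' ∧ f' < (i : Int) := by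
        intro f' hf'
        have h1 := (hb f' (List.mem_cons_of_mem f hf')).2
        have h2 := (List.pairwise_cons.mp hpw).1 f' hf'
        have h3 := (hb f' (List.mem_cons_of_mem f hf')).1
        exact ⟨by omega, h1⟩
      by_cases hfe : f = (s : Int)
      · subst hfe
        have hgt : s < i := by exact_mod_cast by omega
        show PySem.List.insert (if (s:Int) == (s:Int) then "" :: y :: pvBuild (PySem.List.enumerate ys ((s:Int)+1)) fs
              else y :: pvBuild (PySem.List.enumerate ys ((s:Int)+1)) ((s:Int) :: fs)) (((i - s) + (fs.length + 1) : Nat) : Int) ""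
            = (if (s:Int) == (s:Int) then "" :: y :: pvBuild (PySem.List.enumerate ys ((s:Int)+1)) (fs ++ [(i:Int)])
               else y :: pvBuild (PySem.List.enumerate ys ((s:Int)+1)) ((s:Int) :: (fs ++ [(i:Int)])))
        rw [if_pos (by simp), if_pos (by simp)]
        rw [show (((i - s) + (fs.length + 1) : Nat) : Int) = ((((i - (s+1)) + fs.length : Nat) : Int) + 1) + 1 by push_cast; omega]
        rw [pvInsert_cons_succ "" _ _ (by positivity) ""]
        rw [pvInsert_cons_succ y _ _ (Int.natCast_nonneg _) ""]
        rw [show (s : Int) + 1 = ((s + 1 : Nat) : Int) by push_cast; ring]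
        rw [ih (s + 1) i fs (List.pairwise_cons.mp hpw).2 (by simpa using hfs) (by omega) (by have := hlt; simp at this; omega)]
      · have hfgt : (s : Int) + 1 ≤ f := by omega
        have hgt : s < i := by
          have := hf.2; omega
        show PySem.List.insert (if f == (s:Int) then "" :: y :: pvBuild (PySem.List.enumerate ys ((s:Int)+1)) fs
              else y :: pvBuild (PySem.List.enumerate ys ((s:Int)+1)) (f :: fs)) (((i - s) + (fs.length + 1) : Nat) : Int) ""
            = (if f == (s:Int) then "" :: y :: pvBuild (PySem.List.enumerate ys ((s:Int)+1)) (fs ++ [(i:Int)])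
               else y :: pvBuild (PySem.List.enumerate ys ((s:Int)+1)) (f :: (fs ++ [(i:Int)])))
        rw [if_neg (by simpa using hfe), if_neg (by simpa using hfe)]
        rw [show (((i - s) + (fs.length + 1) : Nat) : Int) = (((i - (s+1)) + (fs.length + 1) : Nat) : Int) + 1 by push_cast; omega]
        rw [pvInsert_cons_succ y _ _ (Int.natCast_nonneg _) ""]
        rw [show (s : Int) + 1 = ((s + 1 : Nat) : Int) by push_cast; ring]
        have := ih (s + 1) i (f :: fs) hpw (by
          intro f' hf'
          rcases List.mem_cons.mp hf' with h | h
          · subst h; exact ⟨by push_cast; omega, hf.2⟩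
          · have := hfs f' h; push_cast; push_cast at this; omega) (by omega) (by have := hlt; simp at this; omega)
        simpa using this

-- has some recent line (window of 10) opened a '::: {#' block?
def pvProp (lines : List String) (j : Nat) : Bool :=
  PySem.Str.startswith (PySem.Str.strip (lines.getD j "")) "::: {#"

-- what B's lastOpen field means after the first i0 lines
def pvLO (lines : List String) (i0 : Nat) : Option Int → Prop
  | none => ∀ j : Nat, j < i0 → pvProp lines j = false
  | some m => 0 ≤ m ∧ m < (i0 : Int) ∧ pvProp lines m.toNat = true ∧
      ∀ j : Nat, m < (j : Int) → j < i0 → pvProp lines j = false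

theorem pvFoldl_or (q : Int → Bool) : ∀ (l : List Int) (a : Bool),
    l.foldl (fun acc j => if acc then acc else q j) a = (a || l.any q) := by
  intro l
  induction l with
  | nil => intro a; simp
  | cons j t ih => intro a; cases a <;> simp [ih]

theorem pvLookA_eq (lines : List String) (i0 : Nat) (hle : i0 ≤ lines.length) (lo : Option Int)
    (h : pvLO lines i0 lo) :
    pvLookA lines (i0 : Int) = pvNear (i0 : Int) lo := by
  have hq : ∀ j : Int, 0 ≤ j → j < (i0 : Int) →
      (PySem.Str.startswith (PySem.Str.strip (PySem.List.pyGetD lines j "")) "::: {#") = pvProp lines j.toNat := by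
    intro j h0 hj
    unfold pvProp
    rw [show j = ((j.toNat : Nat) : Int) by omega, PySem.List.pyGetD_natCast, Int.toNat_natCast]
  unfold pvLookA pvNear
  rw [pvFoldl_or]
  rw [Bool.false_or]
  cases lo with
  | none =>
    apply List.any_eq_false.mpr
    intro j hj
    have hmem := PySem.List.mem_pyRange_one.mp hj
    have h0 : 0 ≤ j := by have := le_max_left 0 ((i0:Int) - 10); omega
    rw [hq j h0 hmem.2]
    simp [h j.toNat (by omega)]
  | some m =>
    obtain ⟨h0, hm, hpm, hmax⟩ := h
    by_cases hge : m ≥ (i0 : Int) - 10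
    · have : (PySem.List.pyRange (max 0 ((i0:Int) - 10)) (i0:Int) 1).any
          (fun j => PySem.Str.startswith (PySem.Str.strip (PySem.List.pyGetD lines j "")) "::: {#") = true := by
        apply List.any_eq_true.mpr
        exact ⟨m, PySem.List.mem_pyRange_one.mpr ⟨by omega, hm⟩, by rw [hq m h0 hm]; exact hpm⟩
      rw [this]
      simp [hge]
    · have : (PySem.List.pyRange (max 0 ((i0:Int) - 10)) (i0:Int) 1).any
          (fun j => PySem.Str.startswith (PySem.Str.strip (PySem.List.pyGetD lines j "")) "::: {#") = false := by
        apply List.any_eq_false.mpr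
        intro j hj
        have hmem := PySem.List.mem_pyRange_one.mp hj
        have h0j : 0 ≤ j := by have := le_max_left 0 ((i0:Int) - 10); omega
        rw [hq j h0j hmem.2]
        have hgt : m < ((j.toNat : Nat) : Int) := by have := le_max_right 0 ((i0:Int) - 10); omega
        simp [hmax j.toNat hgt (by omega)]
      rw [this]
      simp [hge]

theorem pvSw_head (s p : String) (h : PySem.Str.startswith s p = true) (c : Char)
    (hc : p.toList.head? = some c) : s.toList.head? = some c := by
  rw [PySem.Str.startswith_eq] at h
  obtain ⟨t, ht⟩ := (PySem.Chars.startswith_iff _ _).mp h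
  cases hp : p.toList with
  | nil => rw [hp] at hc; simp at hc
  | cons c0 cs =>
    rw [hp] at hc ht
    simp at hc
    rw [← ht]
    simp [hc]

theorem pvMarker_not_open (s : String)
    (h : (PySem.Str.startswith s "1. " || PySem.Str.startswith s "- " || PySem.Str.startswith s "* ") = true) :
    PySem.Str.startswith s "::: {#" = false := by
  by_contra hh
  have hh' : PySem.Str.startswith s "::: {#" = true := by
    cases h2 : PySem.Str.startswith s "::: {#" with
    | false => exact absurd h2 hh
    | true => rfl
  have hcolon : s.toList.head? = some ':' := pvSw_head s "::: {#" hh' ':' (by decide)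
  rcases Bool.or_eq_true_iff.mp h with h1 | h3
  · rcases Bool.or_eq_true_iff.mp h1 with h1a | h2a
    · have := pvSw_head s "1. " h1a '1' (by decide); rw [hcolon] at this; simp at this
    · have := pvSw_head s "- " h2a '-' (by decide); rw [hcolon] at this; simp at this
  · have := pvSw_head s "* " h3 '*' (by decide); rw [hcolon] at this; simp at this

-- the full relation between A's loop state and B's after the first i0 lines
def pvInv (lines : List String) (i0 : Nat) (a : PvStA) (b : PvStB) : Prop :=
  a.errors = b.errors ∧
  a.offset = (b.flagged.length : Int) ∧
  a.fixed = pvBuild (PySem.List.enumerate lines 0) b.flagged ∧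
  b.flagged.Pairwise (· < ·) ∧
  (∀ f ∈ b.flagged, 1 ≤ f ∧ f < (i0 : Int)) ∧
  a.inCode = b.inCode ∧ a.inFront = b.inFront ∧
  pvLO lines i0 b.lastOpen

theorem pvBnd_succ {fl : List Int} {i0 : Nat} (h : ∀ f ∈ fl, 1 ≤ f ∧ f < (i0 : Int)) :
    ∀ f ∈ fl, 1 ≤ f ∧ f < ((i0 + 1 : Nat) : Int) := by
  intro f hf
  have := h f hf
  push_cast
  omega

theorem pvLO_step (lines : List String) (i0 : Nat) (x : String) (hx : lines.getD i0 "" = x)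
    (lo : Option Int) (h : pvLO lines i0 lo) :
    pvLO lines (i0 + 1)
      (if PySem.Str.startswith (PySem.Str.strip x) "::: {#" then some (i0 : Int) else lo) := by
  by_cases hp : PySem.Str.startswith (PySem.Str.strip x) "::: {#" = true
  · rw [if_pos hp]
    refine ⟨by omega, by push_cast; omega, ?_, ?_⟩
    · rw [Int.toNat_natCast]
      unfold pvProp
      rw [hx]
      exact hp
    · intro j hj1 hj2
      omega
  · rw [if_neg hp]
    have hpf : pvProp lines i0 = false := by
      unfold pvProp
      rw [hx]
      cases hs : PySem.Str.startswith (PySem.Str.strip x) "::: {#" with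
      | false => rfl
      | true => exact absurd hs hp
    cases lo with
    | none =>
      intro j hj
      by_cases hji : j = i0
      · subst hji; exact hpf
      · exact h j (by omega)
    | some m =>
      obtain ⟨h0, hm, hpm, hmax⟩ := h
      refine ⟨h0, by push_cast; omega, hpm, ?_⟩
      intro j hj1 hj2
      by_cases hji : j = i0
      · subst hji; exact hpf
      · exact hmax j hj1 (by omega)

-- an iteration that records no error: only lastOpen may move
theorem pvInv_same (lines : List String) (i0 : Nat) (eB : List String) (flB : List Int)
    (ic ifr : Bool) (lo' : Option Int)
    (hpw : flB.Pairwise (· < ·)) (hbnd : ∀ f ∈ flB, 1 ≤ f ∧ f < (i0 : Int))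
    (hlo : pvLO lines (i0 + 1) lo') :
    pvInv lines (i0 + 1)
      ⟨eB, pvBuild (PySem.List.enumerate lines 0) flB, (flB.length : Int), ic, ifr⟩
      ⟨eB, flB, ic, ifr, lo'⟩ :=
  ⟨rfl, rfl, rfl, hpw, pvBnd_succ hbnd, rfl, rfl, hlo⟩

-- an iteration that records an error: A inserts a blank, B flags the index
theorem pvInv_fire (lines : List String) (i0 : Nat) (hpos : 0 < i0) (hlen : i0 < lines.length)
    (eB : List String) (msg : String) (flB : List Int) (ic ifr : Bool) (lo' : Option Int)
    (hpw : flB.Pairwise (· < ·)) (hbnd : ∀ f ∈ flB, 1 ≤ f ∧ f < (i0 : Int))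
    (hlo : pvLO lines (i0 + 1) lo') :
    pvInv lines (i0 + 1)
      ⟨eB ++ [msg], PySem.List.insert (pvBuild (PySem.List.enumerate lines 0) flB) ((i0 : Int) + (flB.length : Int)) "",
        (flB.length : Int) + 1, ic, ifr⟩
      ⟨eB ++ [msg], flB ++ [(i0 : Int)], ic, ifr, lo'⟩ := by
  have hins : PySem.List.insert (pvBuild (PySem.List.enumerate lines 0) flB) ((i0 : Int) + (flB.length : Int)) ""
      = pvBuild (PySem.List.enumerate lines 0) (flB ++ [(i0 : Int)]) := by
    have h0 : ((i0 : Int) + (flB.length : Int)) = (((i0 - 0) + flB.length : Nat) : Int) := by push_cast; omega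
    rw [h0]
    exact pvBuild_insert lines 0 i0 flB hpw (by intro f hf; exact ⟨by have := (hbnd f hf).1; omega, (hbnd f hf).2⟩)
      (by omega) (by omega)
  refine ⟨rfl, by simp, hins, ?_, ?_, rfl, rfl, hlo⟩
  · rw [List.pairwise_append]
    exact ⟨hpw, List.pairwise_singleton _ _, by intro f hf _ hmem; simp at hmem; subst hmem; exact (hbnd f hf).2⟩
  · intro f hf
    rcases List.mem_append.mp hf with h | h
    · exact pvBnd_succ hbnd f h
    · simp at h; subst h; constructor
      · omega
      · push_cast; omega

set_option maxHeartbeats 1000000 in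
-- one iteration preserves the relation
theorem pvStep_inv (lines done : List String) (x : String) (rest : List String)
    (h : lines = done ++ x :: rest) (a : PvStA) (b : PvStB)
    (hinv : pvInv lines done.length a b) :
    pvInv lines (done.length + 1)
      (pvStepA lines true a ((done.length : Int), x))
      (pvStepB lines b ((done.length : Int), x)) := by
  obtain ⟨eA, fxA, offA, icA, ifrA⟩ := a
  obtain ⟨eB, flB, icB, ifrB, loB⟩ := b
  obtain ⟨he, hoff, hfix, hpw, hbnd, hic, hifr, hlo⟩ := hinv
  dsimp only at he hoff hfix hic hifr hlo hbnd hpw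
  subst he hic hifr
  have hx : lines.getD done.length "" = x := by
    subst h
    rw [List.getD_eq_getElem?_getD, List.getElem?_append_right (le_refl _)]
    simp
  have hlen : done.length < lines.length := by subst h; simp
  unfold pvStepA pvStepB
  dsimp only
  -- make every branch condition opaque so that the if-rewrites below stay cheap
  generalize hLK : pvLookA lines ((done.length : Int)) = lkA
  generalize hsx : PySem.Str.strip x = sx
  generalize hc1 : (((done.length : Int)) == 0 && (sx == "---")) = c1
  generalize hc2 : (sx == "---") = c2
  generalize hc3 : PySem.Str.startswith sx "```" = c3
  generalize hc4 : PySem.Str.startswith sx ":::" = c4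
  generalize hc5 : (PySem.Str.startswith sx "1. " || PySem.Str.startswith sx "- " || PySem.Str.startswith sx "* ") = c5
  generalize hop : PySem.Str.startswith sx "::: {#" = op
  have hlo' : pvLO lines (done.length + 1) (if op = true then some ((done.length : Int)) else loB) := by
    rw [← hop, ← hsx]
    exact pvLO_step lines done.length x hx loB hlo
  by_cases h1 : c1 = true
  · rw [if_pos h1, if_pos h1, hfix, hoff]
    exact pvInv_same lines done.length eA flB icA true _ hpw hbnd hlo'
  · rw [if_neg h1, if_neg h1]
    by_cases h2 : ifrA = true
    · rw [if_pos h2, if_pos h2]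
      by_cases h3 : c2 = true
      · rw [if_pos h3, if_pos h3, hfix, hoff]
        exact pvInv_same lines done.length eA flB icA false _ hpw hbnd hlo'
      · rw [if_neg h3, if_neg h3, hfix, hoff]
        exact pvInv_same lines done.length eA flB icA ifrA _ hpw hbnd hlo'
    · rw [if_neg h2, if_neg h2]
      by_cases h4 : c3 = true
      · rw [if_pos h4, if_pos h4, hfix, hoff]
        exact pvInv_same lines done.length eA flB (!icA) ifrA _ hpw hbnd hlo'
      · rw [if_neg h4, if_neg h4]
        by_cases h5 : icA = true
        · rw [if_pos h5, if_pos h5, hfix, hoff]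
          exact pvInv_same lines done.length eA flB icA ifrA _ hpw hbnd hlo'
        · rw [if_neg h5, if_neg h5]
          by_cases h7 : (0 : Int) < (done.length : Int)
          · -- i0 ≥ 1: the previous line A reads in fixed_lines IS original line i0-1
            have hbnd0 : ∀ f ∈ flB, (0 : Int) ≤ f ∧ f < (done.length : Int) := by
              intro f hf
              exact ⟨by have := (hbnd f hf).1; omega, (hbnd f hf).2⟩
            have hgd := pvBuild_getD lines 0 done.length flB hpw hbnd0 (by omega) (by omega)
            simp only [Nat.sub_zero] at hgd
            have e1 : PySem.List.pyGetD fxA ((done.length : Int) + offA - 1) ""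
                = lines.getD (done.length - 1) "" := by
              rw [hfix, hoff,
                  show ((done.length : Int) + (flB.length : Int) - 1)
                    = ((done.length + flB.length - 1 : Nat) : Int) by omega,
                  PySem.List.pyGetD_natCast]
              exact hgd
            have e2 : PySem.List.pyGetD lines ((done.length : Int) - 1) ""
                = lines.getD (done.length - 1) "" := by
              rw [show ((done.length : Int) - 1) = ((done.length - 1 : Nat) : Int) by omega,
                  PySem.List.pyGetD_natCast]
            rw [if_pos h7, if_pos h7, e2]
            generalize hpv : PySem.Str.strip (lines.getD (done.length - 1) "") = pv
            by_cases h6 : c4 = true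
            · rw [if_pos h6, if_pos h6, if_pos h7, e1, hpv]
              by_cases h8 : ((pv != "") && (pv != "---") && !(PySem.Str.startswith pv ":::")) = true
              · rw [if_pos h8]
                rw [if_pos (show (decide ((0 : Int) < (done.length : Int)) && pv != "" && pv != "---" && !PySem.Str.startswith pv ":::") = true by
                      rw [decide_eq_true h7, Bool.true_and]; exact h8)]
                rw [hfix, hoff]
                exact pvInv_fire lines done.length (by omega) hlen eA _ flB icA ifrA _ hpw hbnd hlo'
              · rw [if_neg h8]
                rw [if_neg (show ¬(decide ((0 : Int) < (done.length : Int)) && pv != "" && pv != "---" && !PySem.Str.startswith pv ":::") = true by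
                      rw [decide_eq_true h7, Bool.true_and]; exact h8)]
                rw [hfix, hoff]
                exact pvInv_same lines done.length eA flB icA ifrA _ hpw hbnd hlo'
            · rw [if_neg h6, if_neg h6]
              by_cases h9 : c5 = true
              · rw [if_pos h9, if_pos h9, if_pos h7]
                rw [if_pos (show (0 : Int) ≤ (done.length : Int) + offA - 1 by rw [hoff]; omega)]
                rw [e1, hpv]
                -- a list-marker line never updates lastOpen
                have hnopen : op = false := by
                  rw [← hop]
                  exact pvMarker_not_open sx (by rw [hc5]; exact h9)
                rw [if_neg (show ¬(op = true) by simp [hnopen])] at hlo' ⊢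
                have hlook : lkA = pvNear ((done.length : Int)) loB := by
                  rw [← hLK]
                  exact pvLookA_eq lines done.length (le_of_lt hlen) loB hlo
                rw [hlook]
                by_cases h10 : ((pv != "")
                    && !((PySem.Str.startswith pv "1. ")
                        || (PySem.Str.startswith pv "- ")
                        || (PySem.Str.startswith pv "* "))
                    && !(PySem.Str.startswith pv ":::")) = true
                · rw [if_pos h10]
                  rw [if_pos (show (decide ((0 : Int) < (done.length : Int)) && pv != "" && !(PySem.Str.startswith pv "1. " || PySem.Str.startswith pv "- " || PySem.Str.startswith pv "* ") && !PySem.Str.startswith pv ":::") = true by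
                        rw [decide_eq_true h7, Bool.true_and]; exact h10)]
                  by_cases h11 : pvNear ((done.length : Int)) loB = true
                  · rw [if_pos h11, if_pos h11]
                    rw [hfix, hoff]
                    exact pvInv_fire lines done.length (by omega) hlen eA _ flB icA ifrA _ hpw hbnd hlo'
                  · rw [if_neg h11, if_neg h11, hfix, hoff]
                    exact pvInv_same lines done.length eA flB icA ifrA _ hpw hbnd hlo'
                · rw [if_neg h10]
                  rw [if_neg (show ¬(decide ((0 : Int) < (done.length : Int)) && pv != "" && !(PySem.Str.startswith pv "1. " || PySem.Str.startswith pv "- " || PySem.Str.startswith pv "* ") && !PySem.Str.startswith pv ":::") = true by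
                        rw [decide_eq_true h7, Bool.true_and]; exact h10)]
                  rw [hfix, hoff]
                  exact pvInv_same lines done.length eA flB icA ifrA _ hpw hbnd hlo'
              · rw [if_neg h9, if_neg h9, hfix, hoff]
                exact pvInv_same lines done.length eA flB icA ifrA _ hpw hbnd hlo'
          · -- first line: no previous line, nothing can fire
            by_cases h6 : c4 = true
            · rw [if_pos h6, if_pos h6, if_neg h7]
              rw [decide_eq_false h7]; simp only [Bool.false_and]
              rw [if_neg (show ¬(false = true) by simp), hfix, hoff]
              exact pvInv_same lines done.length eA flB icA ifrA _ hpw hbnd hlo'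
            · rw [if_neg h6, if_neg h6]
              by_cases h9 : c5 = true
              · rw [if_pos h9, if_pos h9, if_neg h7]
                rw [decide_eq_false h7]; simp only [Bool.false_and]
                rw [if_neg (show ¬(false = true) by simp), hfix, hoff]
                exact pvInv_same lines done.length eA flB icA ifrA _ hpw hbnd hlo'
              · rw [if_neg h9, if_neg h9, hfix, hoff]
                exact pvInv_same lines done.length eA flB icA ifrA _ hpw hbnd hlo'

-- the invariant carried over the whole enumeration
theorem pvMain (lines : List String) : ∀ (rest done : List String) (a : PvStA) (b : PvStB),
    lines = done ++ rest → pvInv lines done.length a b →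
    pvInv lines lines.length
      ((PySem.List.enumerate rest ((done.length : Nat) : Int)).foldl (pvStepA lines true) a)
      ((PySem.List.enumerate rest ((done.length : Nat) : Int)).foldl (pvStepB lines) b) := by
  intro rest
  induction rest with
  | nil =>
    intro done a b h hinv
    rw [PySem.List.enumerate_nil]
    simp only [List.foldl_nil]
    subst h
    simpa using hinv
  | cons x rest ih =>
    intro done a b h hinv
    rw [PySem.List.enumerate_cons]
    simp only [List.foldl_cons]
    have hstep := pvStep_inv lines done x rest h a b hinv
    have h2 : lines = (done ++ [x]) ++ rest := by simp [h]
    have hlen2 : (done ++ [x]).length = done.length + 1 := by simp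
    have := ih (done ++ [x]) _ _ h2 (by rw [hlen2]; exact hstep)
    rw [hlen2] at this
    have hcast : (((done.length + 1 : Nat)) : Int) = ((done.length : Nat) : Int) + 1 := by push_cast; ring
    rw [hcast] at this
    exact this

-- ===== VERDICT (by name: the statement is the Claim_ definition above) =====
theorem check_fenced_divs_spec : Claim_equal_check_fenced_divs := by
  intro filepath lines do_fix hdom hpre
  unfold Pre_check_fenced_divs at hpre
  subst hpre
  unfold Spec_check_fenced_divs check_fenced_divs check_fenced_divs_alt
  have h0 : pvInv lines 0 ⟨[], lines, 0, false, false⟩ ⟨[], [], false, false, none⟩ := by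
    refine ⟨rfl, rfl, (pvBuild_nil_flag lines 0).symm, List.Pairwise.nil, by simp, rfl, rfl, ?_⟩
    intro j hj
    omega
  have hmain := pvMain lines lines [] ⟨[], lines, 0, false, false⟩ ⟨[], [], false, false, none⟩ (by simp) (by simpa using h0)
  simp only [List.length_nil, Nat.cast_zero] at hmain
  obtain ⟨he, -, hfix, -⟩ := hmain
  dsimp only
  rw [he, hfix]
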